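-- pv_equiv track=rewrite | github.com/xueanxi/sharebook | src/services/novel_to_comic/utils/text_processor.py | extract_character_mentions
-- ===== SOURCE A (Python) =====
-- from typing import List, Dict, Any, Tuple, Optional
--
-- def extract_character_mentions(text: str, character_names: List[str]) -> List[str]:
--     """
--     提取文本中提及的角色
--
--     Args:
--         text: 输入文本
--         character_names: 角色名称列表
--
--     Returns:
--         提及的角色列表
--     """
--     mentioned_characters = []
--
--     for name in character_names:
--         if name in text:
--             mentioned_characters.append(name)
--
--     # 去重并保持顺序
--     seen = set()
--     unique_mentions = [x for x in mentioned_characters if not (x in seen or seen.add(x))]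
--
--     return unique_mentions
-- ===== SOURCE B (Python) =====
-- def extract_character_mentions(text, character_names):
--     lengths = {len(name) for name in character_names}
--     n = len(text)
--     present = {text[i:i + L] for i in range(n + 1) for L in lengths if i + L <= n}
--     return [name for name in dict.fromkeys(character_names) if name in present]
-- ===== Notes on version B (the rewrite author's own statement) =====
-- stated objective: faster
-- what changed: B builds one set index of all text windows whose lengths are name lengths and filters the deduplicated name list by set membership, instead of running a naive substring scan of the whole text for every name.
import Mathlib
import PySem

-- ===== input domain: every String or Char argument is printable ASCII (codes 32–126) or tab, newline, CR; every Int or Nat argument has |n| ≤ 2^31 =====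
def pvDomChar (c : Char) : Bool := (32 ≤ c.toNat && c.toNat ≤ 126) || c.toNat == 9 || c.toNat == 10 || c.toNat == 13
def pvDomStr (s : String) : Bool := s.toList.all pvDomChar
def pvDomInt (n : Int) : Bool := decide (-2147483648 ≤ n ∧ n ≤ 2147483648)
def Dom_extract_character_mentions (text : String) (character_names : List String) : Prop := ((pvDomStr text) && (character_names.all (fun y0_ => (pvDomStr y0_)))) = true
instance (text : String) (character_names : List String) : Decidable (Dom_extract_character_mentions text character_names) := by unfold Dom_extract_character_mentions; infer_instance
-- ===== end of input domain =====

-- B replaces per-name naive substring scans by one substring index (the set of all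
-- text windows with lengths drawn from the name lengths), then filters the
-- deduplicated name list by set membership.

-- ===== PORT A =====
-- A: append each name contained in text, then dedup with a 'seen' set.
def extract_character_mentions (text : String) (character_names : List String) : List String :=
  let mentioned := character_names.foldl
    (fun acc name => if PySem.Str.isIn name text then acc ++ [name] else acc) []
  (mentioned.foldl
    (fun (st : PySem.Set String × List String) x =>
      if PySem.Set.contains st.1 x then st else (PySem.Set.add st.1 x, st.2 ++ [x]))
    (PySem.Set.empty, [])).2

-- ===== PORT B =====
-- B: index all windows of text whose length is some name's length, then filter
-- the deduplicated names by membership in that set.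
def extract_character_mentions_alt (text : String) (character_names : List String) : List String :=
  let lengths : PySem.Set Int := PySem.Set.ofList (character_names.map PySem.Str.len)
  let n : Int := PySem.Str.len text
  let present : PySem.Set String := PySem.Set.ofList
    ((PySem.List.pyRange 0 (n + 1)).flatMap (fun i =>
      (lengths.filter (fun L => decide (i + L ≤ n))).map (fun L =>
        PySem.Str.slice text (some i) (some (i + L)))))
  (PySem.List.dedup character_names).filter (fun name => PySem.Set.contains present name)

-- ===== PRECONDITION & SPEC =====
def Spec_extract_character_mentions (text : String) (character_names : List String) (out : List String) : Prop := out = extract_character_mentions_alt text character_names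
instance (text : String) (character_names : List String) (out : List String) : Decidable (Spec_extract_character_mentions text character_names out) := by unfold Spec_extract_character_mentions; infer_instance

-- ===== CLAIM (what is proved, stated in full; the proofs are below) =====
def Claim_equal_extract_character_mentions : Prop := ∀ (text : String) (character_names : List String), Dom_extract_character_mentions text character_names → Spec_extract_character_mentions text character_names (extract_character_mentions text character_names)

-- ===== LEMMAS AND PROOFS =====

-- A's comprehension-with-seen-set loop is set insertion run on two equal accumulators.
lemma pair_fold_eq_add {α : Type} [BEq α] (l : List α) (s : PySem.Set α) :
    l.foldl
      (fun (st : PySem.Set α × List α) x =>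
        if PySem.Set.contains st.1 x then st else (PySem.Set.add st.1 x, st.2 ++ [x]))
      (s, s)
    = (l.foldl PySem.Set.add s, l.foldl PySem.Set.add s) := by
  induction l generalizing s with
  | nil => rfl
  | cons x t ih =>
    simp only [List.foldl_cons]
    by_cases hc : PySem.Set.contains s x
    · rw [if_pos hc, ih s]
      have : PySem.Set.add s x = s := by simp [PySem.Set.add, PySem.Set.contains] at hc ⊢; simp [hc]
      rw [this]
    · rw [if_neg hc]
      have hadd : PySem.Set.add s x = s ++ [x] := by simp [PySem.Set.add, PySem.Set.contains] at hc ⊢; simp [hc]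
      rw [hadd, ih (s ++ [x])]

-- set insertion commutes with filtering.
lemma foldl_add_filter {α : Type} [BEq α] [LawfulBEq α] (p : α → Bool) :
    ∀ (xs s : List α),
      (xs.foldl PySem.Set.add s).filter p = (xs.filter p).foldl PySem.Set.add (s.filter p) := by
  intro xs
  induction xs with
  | nil => intro s; rfl
  | cons x t ih =>
    intro s
    have hstep : (PySem.Set.add s x).filter p
        = if p x then PySem.Set.add (s.filter p) x else s.filter p := by
      by_cases hm : x ∈ s
      · have hc : PySem.Set.contains s x := by
          simpa [PySem.Set.contains] using List.contains_iff_mem.mpr hm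
        by_cases hp : p x
        · have : PySem.Set.contains (s.filter p) x := by
            simp [PySem.Set.contains, List.mem_filter, hm, hp]
          simp [PySem.Set.add, hp, hm]
        · simp [PySem.Set.add, hp, hm]
      · have hc : ¬ PySem.Set.contains s x := by
          simp [PySem.Set.contains, hm]
        have hcf : ¬ PySem.Set.contains (s.filter p) x := by
          simp [PySem.Set.contains, List.mem_filter, hm]
        by_cases hp : p x
        · simp [PySem.Set.add, hp, hm, List.filter_append]
        · simp [PySem.Set.add, hp, hm, List.filter_append]
    by_cases hp : p x
    · simp only [List.foldl_cons, ih (PySem.Set.add s x), hstep, hp, if_true,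
        List.filter_cons, List.foldl_cons]
    · simp only [List.foldl_cons, ih (PySem.Set.add s x), hstep, hp,
        List.filter_cons]
      simp

lemma dedup_filter {α : Type} [BEq α] [LawfulBEq α] (p : α → Bool) (xs : List α) :
    PySem.List.dedup (xs.filter p) = (PySem.List.dedup xs).filter p := by
  simp only [PySem.List.dedup_eq_ofList, PySem.Set.ofList_eq_foldl]
  have h := foldl_add_filter p xs []
  simpa [PySem.Set.empty] using h.symm

-- a window of text is an infix of text.
lemma take_drop_infix {α : Type} (l : List α) (i L : Nat) : (l.drop i).take L <:+: l := by
  refine ⟨l.take i, l.drop (i + L), ?_⟩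
  have h2 : (l.drop i).drop L = l.drop (i + L) := by
    rw [List.drop_drop]
  rw [List.append_assoc, ← h2, List.take_append_drop, List.take_append_drop]

-- the key index lemma: for a name occurring in the list, membership in the window
-- index coincides with Python's substring test.
lemma contains_present_iff (text name : String) (character_names : List String)
    (hmem : name ∈ character_names) :
    PySem.Set.contains
      (PySem.Set.ofList
        ((PySem.List.pyRange 0 (PySem.Str.len text + 1)).flatMap (fun i =>
          ((PySem.Set.ofList (character_names.map PySem.Str.len)).filter
              (fun L => decide (i + L ≤ PySem.Str.len text))).map (fun L =>
            PySem.Str.slice text (some i) (some (i + L))))))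
      name
    = PySem.Str.isIn name text := by
  rw [Bool.eq_iff_iff]
  rw [PySem.Str.isIn_iff_infix]
  constructor
  · intro h
    have hmem' : name ∈ (PySem.List.pyRange 0 (PySem.Str.len text + 1)).flatMap (fun i =>
        ((PySem.Set.ofList (character_names.map PySem.Str.len)).filter
            (fun L => decide (i + L ≤ PySem.Str.len text))).map (fun L =>
          PySem.Str.slice text (some i) (some (i + L)))) := by
      rw [← PySem.Set.mem_ofList]
      simpa [PySem.Set.contains, List.contains_iff_mem] using h
    obtain ⟨i, hi, hn⟩ := List.mem_flatMap.mp hmem'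
    obtain ⟨L, hL, heq⟩ := List.mem_map.mp hn
    have hiR := PySem.List.mem_pyRange_one.mp hi
    have hLmem := List.mem_filter.mp hL
    have hLn : ∃ nm ∈ character_names, PySem.Str.len nm = L := by
      have := (PySem.Set.mem_ofList _ L).mp hLmem.1
      simpa using this
    obtain ⟨nm, _, hnmL⟩ := hLn
    have hL0 : 0 ≤ L := by rw [← hnmL, PySem.Str.len_eq]; positivity
    have hi0 : 0 ≤ i := hiR.1
    -- rewrite the slice as take/drop
    have : name.toList = (text.toList.drop i.toNat).take L.toNat := by
      rw [← heq, PySem.Str.toList_slice, PySem.Chars.slice_eq_listSlice]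
      rw [show (some i) = (some ((i.toNat : Nat) : Int)) by rw [Int.toNat_of_nonneg hi0],
          show (some (i + L)) = (some (((i.toNat : Nat) : Int) + ((L.toNat : Nat) : Int))) by
            rw [Int.toNat_of_nonneg hi0, Int.toNat_of_nonneg hL0]]
      rw [PySem.List.slice_natCast_add]
    rw [this]
    exact take_drop_infix _ _ _
  · intro h
    obtain ⟨s1, s2, hsplit⟩ := h
    have hlen : s1.length + name.toList.length + s2.length = text.toList.length := by
      rw [← hsplit]; simp; omega
    have hm2 : name ∈ (PySem.List.pyRange 0 (PySem.Str.len text + 1)).flatMap (fun i =>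
        ((PySem.Set.ofList (character_names.map PySem.Str.len)).filter
            (fun L => decide (i + L ≤ PySem.Str.len text))).map (fun L =>
          PySem.Str.slice text (some i) (some (i + L)))) := by
      apply List.mem_flatMap.mpr
      refine ⟨(s1.length : Int), ?_, ?_⟩
      · apply PySem.List.mem_pyRange_one.mpr
        constructor
        · positivity
        · rw [PySem.Str.len_eq]; omega
      · apply List.mem_map.mpr
        refine ⟨PySem.Str.len name, ?_, ?_⟩
        · apply List.mem_filter.mpr
          refine ⟨(PySem.Set.mem_ofList _ _).mpr (List.mem_map.mpr ⟨name, hmem, rfl⟩), ?_⟩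
          simp only [decide_eq_true_eq, PySem.Str.len_eq]
          omega
        · apply String.toList_inj.mp
          rw [PySem.Str.toList_slice, PySem.Chars.slice_eq_listSlice, PySem.Str.len_eq,
            PySem.List.slice_natCast_add, ← hsplit]
          simp
    simp only [PySem.Set.contains, List.contains_iff_mem]
    exact (PySem.Set.mem_ofList _ name).mpr hm2

-- ===== VERDICT (by name: the statement is the Claim_ definition above) =====
theorem extract_character_mentions_spec : Claim_equal_extract_character_mentions := by
  intro text character_names _
  unfold Spec_extract_character_mentions extract_character_mentions extract_character_mentions_alt
  simp only [PySem.List.foldl_append_if_eq_filter, List.nil_append]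
  have hempty : (PySem.Set.empty : PySem.Set String) = ([] : List String) := rfl
  rw [hempty, pair_fold_eq_add]
  simp only
  rw [← PySem.Set.ofList_eq_foldl, ← PySem.List.dedup_eq_ofList, dedup_filter]
  apply List.filter_congr
  intro name hmemd
  have hmem : name ∈ character_names := (PySem.List.mem_dedup _ _).mp hmemd
  exact (contains_present_iff text name character_names hmem).symm
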